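-- pv_equiv track=rewrite | github.com/skchow03/icr2tools | sg_viewer/preview/runtime_ops_editing/edit_commit_adapter.py | _expanded_drag_indices
-- ===== SOURCE A (Python) =====
-- def _expanded_drag_indices(
--     indices: list[int] | None, total_sections: int
-- ) -> list[int] | None:
--     if not indices:
--         return None
--     expanded: set[int] = set()
--     for index in indices:
--         if index < 0 or index >= total_sections:
--             continue
--         expanded.add(index)
--         if index - 1 >= 0:
--             expanded.add(index - 1)
--         if index + 1 < total_sections:
--             expanded.add(index + 1)
--     if not expanded:
--         return None
--     return sorted(expanded)
-- ===== SOURCE B (Python) =====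
-- def _expanded_drag_indices(
--     indices: list[int] | None, total_sections: int
-- ) -> list[int] | None:
--     if not indices:
--         return None
--     result: list[int] = []
--     for index in sorted(indices):
--         if index < 0 or index >= total_sections:
--             continue
--         for j in (index - 1, index, index + 1):
--             if 0 <= j < total_sections and (not result or result[-1] < j):
--                 result.append(j)
--     return result if result else None
-- ===== Notes on version B (the rewrite author's own statement) =====
-- stated objective: alternative
-- what changed: Drops the set and the final sort: B sorts the input indices once, then emits each index with its neighbours in a single increasing scan, deduplicating by comparing against the last emitted value, so the output is built already sorted.
import Mathlib
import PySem

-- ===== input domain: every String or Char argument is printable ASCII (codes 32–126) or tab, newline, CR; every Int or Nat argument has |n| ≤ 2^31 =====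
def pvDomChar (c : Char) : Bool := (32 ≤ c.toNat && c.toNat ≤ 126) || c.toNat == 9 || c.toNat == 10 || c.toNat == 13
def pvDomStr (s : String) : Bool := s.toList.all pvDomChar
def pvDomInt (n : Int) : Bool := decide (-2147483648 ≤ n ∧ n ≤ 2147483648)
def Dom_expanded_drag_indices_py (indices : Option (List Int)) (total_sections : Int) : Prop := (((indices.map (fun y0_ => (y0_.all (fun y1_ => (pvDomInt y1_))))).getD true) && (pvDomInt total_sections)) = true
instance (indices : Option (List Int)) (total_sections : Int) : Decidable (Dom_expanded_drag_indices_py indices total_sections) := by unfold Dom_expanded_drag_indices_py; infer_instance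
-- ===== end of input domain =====

-- B drops A's set and final sort: it sorts the input indices once and emits each index with its
-- neighbours in one increasing scan, deduplicating against the last emitted value (alternative; not claimed faster).

-- ===== PORT A =====
-- loop body of A's for-loop (set accumulation with neighbour expansion)
def pvStepA (total_sections : Int) (s : PySem.Set Int) (index : Int) : PySem.Set Int :=
  if index < 0 ∨ total_sections ≤ index then s
  else
    let s1 := PySem.Set.add s index
    let s2 := if 0 ≤ index - 1 then PySem.Set.add s1 (index - 1) else s1
    if index + 1 < total_sections then PySem.Set.add s2 (index + 1) else s2

def expanded_drag_indices_py (indices : Option (List Int)) (total_sections : Int) : Option (List Int) :=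
  match indices with
  | none => none
  | some idxs =>
    if idxs = [] then none
    else
      let expanded : PySem.Set Int := idxs.foldl (pvStepA total_sections) PySem.Set.empty
      if expanded = [] then none
      else some (PySem.List.sorted expanded (fun x => x) false)

-- ===== PORT B =====
-- inner conditional append: 'if 0 <= j < total_sections and (not result or result[-1] < j): result.append(j)'
-- ('not result or result[-1] < j' is rendered as 'result.getLast?.getD (j-1) < j': the default j-1 makes the empty case true)
def pvPush (total_sections : Int) (r : List Int) (j : Int) : List Int :=
  if 0 ≤ j ∧ j < total_sections ∧ r.getLast?.getD (j - 1) < j then r ++ [j] else r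

-- loop body of B's for-loop: the guard, then 'for j in (index - 1, index, index + 1)' unrolled
def pvStepB (total_sections : Int) (r : List Int) (index : Int) : List Int :=
  if index < 0 ∨ total_sections ≤ index then r
  else pvPush total_sections (pvPush total_sections (pvPush total_sections r (index - 1)) index) (index + 1)

def expanded_drag_indices_py_alt (indices : Option (List Int)) (total_sections : Int) : Option (List Int) :=
  match indices with
  | none => none
  | some idxs =>
    if idxs = [] then none
    else
      let result := (PySem.List.sorted idxs (fun x => x) false).foldl (pvStepB total_sections) []
      if result = [] then none else some result

-- ===== PRECONDITION & SPEC =====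
def Spec_expanded_drag_indices_py (indices : Option (List Int)) (total_sections : Int) (out : Option (List Int)) : Prop := out = expanded_drag_indices_py_alt indices total_sections
instance (indices : Option (List Int)) (total_sections : Int) (out : Option (List Int)) : Decidable (Spec_expanded_drag_indices_py indices total_sections out) := by unfold Spec_expanded_drag_indices_py; infer_instance

-- ===== CLAIM (what is proved, stated in full; the proofs are below) =====
def Claim_equal_expanded_drag_indices_py : Prop := ∀ (indices : Option (List Int)) (total_sections : Int), Dom_expanded_drag_indices_py indices total_sections → Spec_expanded_drag_indices_py indices total_sections (expanded_drag_indices_py indices total_sections)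

-- ===== LEMMAS AND PROOFS =====

-- the expanded neighbourhood: x belongs to the result iff it is in bounds and within 1 of a valid index
def pvMem (total : Int) (l : List Int) (x : Int) : Prop :=
  0 ≤ x ∧ x < total ∧ ∃ i ∈ l, 0 ≤ i ∧ i < total ∧ (x = i - 1 ∨ x = i ∨ x = i + 1)

theorem pvMem_perm (total : Int) (l l' : List Int) (h : l.Perm l') (x : Int) :
    pvMem total l x ↔ pvMem total l' x := by
  unfold pvMem
  constructor <;> rintro ⟨h0, h1, i, hi, hrest⟩
  · exact ⟨h0, h1, i, h.mem_iff.mp hi, hrest⟩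
  · exact ⟨h0, h1, i, h.mem_iff.mpr hi, hrest⟩

theorem pvMem_cons (total i : Int) (l : List Int) (x : Int) :
    pvMem total (i :: l) x ↔
      (0 ≤ x ∧ x < total ∧ 0 ≤ i ∧ i < total ∧ (x = i - 1 ∨ x = i ∨ x = i + 1)) ∨ pvMem total l x := by
  unfold pvMem
  constructor
  · rintro ⟨h0, h1, j, hj, hv⟩
    rcases List.mem_cons.mp hj with rfl | hj
    · exact Or.inl ⟨h0, h1, hv⟩
    · exact Or.inr ⟨h0, h1, j, hj, hv⟩
  · rintro (⟨h0, h1, hv⟩ | ⟨h0, h1, j, hj, hv⟩)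
    · exact ⟨h0, h1, i, List.mem_cons_self, hv⟩
    · exact ⟨h0, h1, j, List.mem_cons_of_mem i hj, hv⟩

theorem pvMem_concat (total i : Int) (l : List Int) (x : Int) :
    pvMem total (l ++ [i]) x ↔
      pvMem total l x ∨ (0 ≤ x ∧ x < total ∧ 0 ≤ i ∧ i < total ∧ (x = i - 1 ∨ x = i ∨ x = i + 1)) := by
  rw [pvMem_perm total (l ++ [i]) (i :: l) (List.perm_append_singleton i l) x, pvMem_cons]
  tauto

-- ----- A side: membership and nodup of the accumulated set -----

theorem pvStepA_mem (total : Int) (s : PySem.Set Int) (i x : Int) :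
    x ∈ pvStepA total s i ↔
      x ∈ s ∨ (0 ≤ x ∧ x < total ∧ 0 ≤ i ∧ i < total ∧ (x = i - 1 ∨ x = i ∨ x = i + 1)) := by
  simp only [pvStepA]
  by_cases hx : x ∈ s
  · split_ifs <;> simp [PySem.Set.mem_add, hx]
  · split_ifs with h1 h2 h3 <;> simp [PySem.Set.mem_add, hx] <;> omega

theorem pvFoldA_mem (total : Int) (idxs : List Int) (s : PySem.Set Int) (x : Int) :
    x ∈ idxs.foldl (pvStepA total) s ↔ x ∈ s ∨ pvMem total idxs x := by
  induction idxs generalizing s with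
  | nil => simp [pvMem]
  | cons i rest ih =>
    rw [List.foldl_cons, ih, pvStepA_mem, pvMem_cons]
    tauto

theorem pv_nodup_add (s : PySem.Set Int) (x : Int) (h : List.Nodup s) :
    List.Nodup (PySem.Set.add s x) := by
  unfold PySem.Set.add
  split_ifs with hc
  · exact h
  · rw [List.nodup_append]
    refine ⟨h, List.nodup_singleton x, ?_⟩
    intro a ha b hb heq
    subst heq
    rw [List.mem_singleton] at hb
    subst hb
    exact hc ((PySem.Set.contains_iff s a).mpr ha)

theorem pvStepA_nodup (total : Int) (s : PySem.Set Int) (i : Int) (h : List.Nodup s) :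
    List.Nodup (pvStepA total s i) := by
  simp only [pvStepA]
  split_ifs <;> first
    | exact h
    | exact pv_nodup_add _ _ h
    | exact pv_nodup_add _ _ (pv_nodup_add _ _ h)
    | exact pv_nodup_add _ _ (pv_nodup_add _ _ (pv_nodup_add _ _ h))

theorem pvFoldA_nodup (total : Int) (idxs : List Int) (s : PySem.Set Int) (h : List.Nodup s) :
    List.Nodup (idxs.foldl (pvStepA total) s) := by
  induction idxs generalizing s with
  | nil => exact h
  | cons i rest ih => exact ih _ (pvStepA_nodup total s i h)

-- ----- B side: the increasing-emit scan -----

theorem pv_le_getLast (r : List Int) (hpw : r.Pairwise (· < ·)) (x L : Int)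
    (hx : x ∈ r) (hL : r.getLast? = some L) : x ≤ L := by
  induction r with
  | nil => cases hx
  | cons a t ih =>
    cases t with
    | nil =>
      rw [List.mem_singleton] at hx
      simp only [List.getLast?_singleton, Option.some.injEq] at hL
      omega
    | cons b t' =>
      rw [List.getLast?_cons_cons] at hL
      rcases List.mem_cons.mp hx with rfl | hx'
      · have hLm : L ∈ b :: t' := List.mem_of_getLast? hL
        have := (List.pairwise_cons.mp hpw).1 L hLm
        omega
      · exact ih (List.pairwise_cons.mp hpw).2 hx' hL

-- one conditional append: membership grows by exactly the in-bounds candidates up to c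
theorem pvPush_inv (total i c : Int) (done r : List Int)
    (_hi : 0 ≤ i ∧ i < total) (hc : i - 1 ≤ c ∧ c ≤ i + 1)
    (hle : ∀ d ∈ done, d ≤ i)
    (hpw : r.Pairwise (· < ·))
    (hmem : ∀ x, x ∈ r ↔ (pvMem total done x ∨ (0 ≤ x ∧ x < total ∧ i - 1 ≤ x ∧ x < c))) :
    (pvPush total r c).Pairwise (· < ·) ∧
    ∀ x, x ∈ pvPush total r c ↔ (pvMem total done x ∨ (0 ≤ x ∧ x < total ∧ i - 1 ≤ x ∧ x ≤ c)) := by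
  unfold pvPush
  by_cases hb : 0 ≤ c ∧ c < total
  · cases hr : r.getLast? with
    | none =>
      have hrnil : r = [] := List.getLast?_eq_none_iff.mp hr
      subst hrnil
      rw [if_pos (by simp only [Option.getD_none]; omega)]
      constructor
      · simp
      · intro x
        simp only [List.nil_append, List.mem_singleton]
        constructor
        · rintro rfl; exact Or.inr ⟨hb.1, hb.2, hc.1, le_refl _⟩
        · rintro (hm | ⟨h0, h1, h2, h3⟩)
          · exact absurd ((hmem x).mpr (Or.inl hm)) (by simp)
          · rcases lt_or_eq_of_le h3 with hlt | rfl
            · exact absurd ((hmem x).mpr (Or.inr ⟨h0, h1, h2, hlt⟩)) (by simp)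
            · rfl
    | some L =>
      have hLm : L ∈ r := List.mem_of_getLast? hr
      by_cases hLc : L < c
      · rw [if_pos (by simp only [Option.getD_some]; omega)]
        have hall : ∀ x ∈ r, x < c := fun x hx =>
          lt_of_le_of_lt (pv_le_getLast r hpw x L hx hr) hLc
        constructor
        · rw [List.pairwise_append]
          exact ⟨hpw, List.pairwise_singleton _ _, fun x hx y hy => by
            rw [List.mem_singleton] at hy; exact hy ▸ hall x hx⟩
        · intro x
          rw [List.mem_append, List.mem_singleton, hmem]
          constructor
          · rintro ((hm | ⟨h0, h1, h2, h3⟩) | rfl)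
            · exact Or.inl hm
            · exact Or.inr ⟨h0, h1, h2, by omega⟩
            · exact Or.inr ⟨hb.1, hb.2, hc.1, le_refl _⟩
          · rintro (hm | ⟨h0, h1, h2, h3⟩)
            · exact Or.inl (Or.inl hm)
            · rcases lt_or_eq_of_le h3 with hlt | rfl
              · exact Or.inl (Or.inr ⟨h0, h1, h2, hlt⟩)
              · exact Or.inr rfl
      · rw [if_neg (by simp only [Option.getD_some]; omega)]
        -- c ≤ L: c is already in r
        have hcr : c ∈ r := by
          rcases (hmem L).mp hLm with hm | ⟨_, _, _, hLlt⟩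
          · obtain ⟨hL0, hL1, d, hd, hd0, hd1, hdv⟩ := hm
            have hdi : d ≤ i := hle d hd
            refine (hmem c).mpr (Or.inl ⟨hb.1, hb.2, d, hd, hd0, hd1, by omega⟩)
          · omega
        refine ⟨hpw, fun x => ?_⟩
        rw [hmem]
        constructor
        · rintro (hm | ⟨h0, h1, h2, h3⟩)
          · exact Or.inl hm
          · exact Or.inr ⟨h0, h1, h2, by omega⟩
        · rintro (hm | ⟨h0, h1, h2, h3⟩)
          · exact Or.inl hm
          · rcases lt_or_eq_of_le h3 with hlt | rfl
            · exact Or.inr ⟨h0, h1, h2, hlt⟩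
            · exact (hmem x).mp hcr
  · rw [if_neg (by intro h; exact hb ⟨h.1, h.2.1⟩)]
    refine ⟨hpw, fun x => ?_⟩
    rw [hmem]
    constructor
    · rintro (hm | ⟨h0, h1, h2, h3⟩)
      · exact Or.inl hm
      · exact Or.inr ⟨h0, h1, h2, by omega⟩
    · rintro (hm | ⟨h0, h1, h2, h3⟩)
      · exact Or.inl hm
      · rcases lt_or_eq_of_le h3 with hlt | rfl
        · exact Or.inr ⟨h0, h1, h2, hlt⟩
        · exact absurd ⟨h0, h1⟩ hb

theorem pvStepB_inv (total i : Int) (done r : List Int)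
    (hle : ∀ d ∈ done, d ≤ i)
    (hpw : r.Pairwise (· < ·))
    (hmem : ∀ x, x ∈ r ↔ pvMem total done x) :
    (pvStepB total r i).Pairwise (· < ·) ∧
    ∀ x, x ∈ pvStepB total r i ↔ pvMem total (done ++ [i]) x := by
  unfold pvStepB
  by_cases hg : i < 0 ∨ total ≤ i
  · rw [if_pos hg]
    refine ⟨hpw, fun x => ?_⟩
    rw [hmem, pvMem_concat]
    constructor
    · exact Or.inl
    · rintro (hm | ⟨_, _, _, _, _⟩)
      · exact hm
      · omega
  · rw [if_neg hg]
    have hi : 0 ≤ i ∧ i < total := by omega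
    have hm1 : ∀ x, x ∈ r ↔ (pvMem total done x ∨ (0 ≤ x ∧ x < total ∧ i - 1 ≤ x ∧ x < i - 1)) := by
      intro x
      rw [hmem]
      constructor
      · exact Or.inl
      · rintro (hm | ⟨_, _, _, h⟩)
        · exact hm
        · omega
    have h1 := pvPush_inv total i (i - 1) done r hi (by omega) hle hpw hm1
    have hm2 : ∀ x, x ∈ pvPush total r (i - 1) ↔
        (pvMem total done x ∨ (0 ≤ x ∧ x < total ∧ i - 1 ≤ x ∧ x < i)) := by
      intro x
      rw [h1.2 x]
      constructor <;>
        · rintro (hm | ⟨h0, ha, hb', hc'⟩)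
          · exact Or.inl hm
          · exact Or.inr ⟨h0, ha, hb', by omega⟩
    have h2 := pvPush_inv total i i done _ hi (by omega) hle h1.1 hm2
    have hm3 : ∀ x, x ∈ pvPush total (pvPush total r (i - 1)) i ↔
        (pvMem total done x ∨ (0 ≤ x ∧ x < total ∧ i - 1 ≤ x ∧ x < i + 1)) := by
      intro x
      rw [h2.2 x]
      constructor <;>
        · rintro (hm | ⟨h0, ha, hb', hc'⟩)
          · exact Or.inl hm
          · exact Or.inr ⟨h0, ha, hb', by omega⟩
    have h3 := pvPush_inv total i (i + 1) done _ hi (by omega) hle h2.1 hm3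
    refine ⟨h3.1, fun x => ?_⟩
    rw [h3.2 x, pvMem_concat]
    constructor
    · rintro (hm | ⟨h0, ha, hb', hc'⟩)
      · exact Or.inl hm
      · exact Or.inr ⟨h0, ha, hi.1, hi.2, by omega⟩
    · rintro (hm | ⟨h0, ha, _, _, h⟩)
      · exact Or.inl hm
      · exact Or.inr ⟨h0, ha, by omega, by omega⟩

theorem pvFoldB_inv (total : Int) (todo done r : List Int)
    (hsorted : todo.Pairwise (· ≤ ·))
    (hle : ∀ d ∈ done, ∀ t ∈ todo, d ≤ t)
    (hpw : r.Pairwise (· < ·))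
    (hmem : ∀ x, x ∈ r ↔ pvMem total done x) :
    (todo.foldl (pvStepB total) r).Pairwise (· < ·) ∧
    ∀ x, x ∈ todo.foldl (pvStepB total) r ↔ pvMem total (done ++ todo) x := by
  induction todo generalizing done r with
  | nil => exact ⟨hpw, by simpa using hmem⟩
  | cons t rest ih =>
    rw [List.foldl_cons]
    have hstep := pvStepB_inv total t done r (fun d hd => hle d hd t List.mem_cons_self) hpw hmem
    have hrec := ih (done ++ [t]) _ (List.pairwise_cons.mp hsorted).2
      (fun d hd u hu => by
        rcases List.mem_append.mp hd with hd | hd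
        · exact hle d hd u (List.mem_cons_of_mem t hu)
        · rw [List.mem_singleton] at hd
          exact hd ▸ (List.pairwise_cons.mp hsorted).1 u hu)
      hstep.1 hstep.2
    refine ⟨hrec.1, fun x => ?_⟩
    rw [hrec.2 x]
    rw [List.append_assoc, List.singleton_append]

-- ===== VERDICT (by name: the statement is the Claim_ definition above) =====
theorem expanded_drag_indices_py_spec : Claim_equal_expanded_drag_indices_py := by
  intro indices total _
  unfold Spec_expanded_drag_indices_py
  cases indices with
  | none => rfl
  | some idxs =>
    simp only [expanded_drag_indices_py, expanded_drag_indices_py_alt]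
    by_cases he : idxs = []
    · simp [he]
    · rw [if_neg he, if_neg he]
      set S := idxs.foldl (pvStepA total) PySem.Set.empty with hS
      set srt := PySem.List.sorted idxs (fun x => x) false with hsrt
      set R := srt.foldl (pvStepB total) [] with hRdef
      have hperm_srt : srt.Perm idxs := PySem.List.sorted_perm idxs (fun x => x) false
      have hB := pvFoldB_inv total srt [] []
        (by simpa using PySem.List.sorted_pairwise idxs (fun x => x))
        (by simp) (by simp) (by simp [pvMem])
      have hBmem : ∀ x, x ∈ R ↔ pvMem total idxs x := fun x => by
        rw [hRdef, hB.2 x, List.nil_append]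
        exact pvMem_perm total srt idxs hperm_srt x
      have hSmem : ∀ x, x ∈ S ↔ pvMem total idxs x := fun x => by
        rw [hS, pvFoldA_mem]
        simp [PySem.Set.empty]
      have hRnd : R.Nodup := (hB.1).nodup
      have hSnd : S.Nodup := pvFoldA_nodup total idxs _ (by simp [PySem.Set.empty])
      have hmemRS : ∀ x, x ∈ R ↔ x ∈ S := fun x => by rw [hBmem, hSmem]
      have hperm : R.Perm S := (List.perm_ext_iff_of_nodup hRnd hSnd).mpr hmemRS
      have hsort : PySem.List.sorted S (fun x => x) false = R :=
        PySem.List.sorted_eq_of_perm_of_pairwise_lt S R (fun x => x) hperm hB.1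
      by_cases hs : S = []
      · rw [if_pos hs, if_pos (by have h := hperm; rw [hs] at h; exact h.eq_nil)]
      · rw [if_neg hs, if_neg (fun hr => hs (by rw [hr] at hperm; exact hperm.symm.eq_nil)), hsort]
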